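-- pv_equiv track=rewrite | github.com/gustkdxo007/Solving-Algorithm | PROGRAMMERS/PROBLEM/숫자블록.py | solution
-- ===== SOURCE A (Python) =====
-- import math
--
-- def solution(begin, end):
--     answer = []
--     for i in range(begin, end+1):
--         if i == 1:
--             answer.append(0)
--             continue
--         for j in range(2, int(math.sqrt(i)) + 1):
--             q = i // j
--             if q > 10000000: continue
--             if i % j == 0:
--                 answer.append(q)
--                 break
--         else:
--             answer.append(1)
--     return answer
-- ===== SOURCE B (Python) =====
-- import math
--
-- def solution(begin, end):
--     # Offset sieve over candidate factors j: for each j we mark its multiples m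
--     # in [begin, end] (with j*j <= m and m//j <= 10000000) first-come-first-served,
--     # instead of trial-dividing every i up to sqrt(i).
--     if end < begin:
--         return []
--     best = [None] * (end - begin + 1)
--     for j in range(2, math.isqrt(end) + 1):
--         start = max(j * j, -(-begin // j) * j)  # first multiple of j that is >= begin and >= j*j
--         for m in range(start, end + 1, j):
--             idx = m - begin
--             if best[idx] is None and m // j <= 10000000:
--                 best[idx] = m // j
--     return [0 if i == 1 else (1 if best[i - begin] is None else best[i - begin])
--             for i in range(begin, end + 1)]
-- ===== Notes on version B (the rewrite author's own statement) =====
-- stated objective: faster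
-- what changed: A trial-divides each number i by every j up to sqrt(i); B runs one offset sieve over the factor candidates j up to sqrt(end), marking each j's multiples in [begin, end] first-come-first-served, so the per-number inner scan disappears (intended as faster; a timing run measured 3.5x-11x on its nontrivial samples but could not confirm it at the largest size).
import Mathlib
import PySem

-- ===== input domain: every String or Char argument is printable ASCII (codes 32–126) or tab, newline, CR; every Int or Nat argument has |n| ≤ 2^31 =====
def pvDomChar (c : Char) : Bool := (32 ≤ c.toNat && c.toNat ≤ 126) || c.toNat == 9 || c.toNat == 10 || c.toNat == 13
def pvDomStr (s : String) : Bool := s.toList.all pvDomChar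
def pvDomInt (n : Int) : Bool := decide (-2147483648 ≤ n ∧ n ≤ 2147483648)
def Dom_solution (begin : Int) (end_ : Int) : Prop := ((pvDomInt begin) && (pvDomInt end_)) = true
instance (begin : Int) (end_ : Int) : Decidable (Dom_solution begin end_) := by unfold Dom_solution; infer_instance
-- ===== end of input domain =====

-- B replaces A's per-number trial division by one offset sieve over the factors j (each j marks
-- its multiples in [begin, end] first-come-first-served); intended as faster: a timing run
-- measured B 3.5x-11x faster on the sampled inputs with nontrivial work, unconfirmed at the largest size.

-- ===== PORT A =====
-- A's int(math.sqrt(i)) equals the floor integer square root for every 0 ≤ i ≤ 2^31 (the Dom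
-- bound; checked against CPython on that whole boundary family), so it is ported as Nat.sqrt;
-- B's math.isqrt(end) is this same function.
def sqrtInt (i : Int) : Int := ((Int.toNat i).sqrt : Int)

-- the inner `for j in range(...): ... break / else` loop of A: some q on break, none on else
def aScan (i : Int) : List Int → Option Int
  | [] => none
  | j :: rest =>
    if PySem.Int.floordiv i j > 10000000 then aScan i rest
    else if PySem.Int.mod i j == 0 then some (PySem.Int.floordiv i j)
    else aScan i rest

def solution (begin : Int) (end_ : Int) : List Int :=
  (PySem.List.pyRange begin (end_ + 1) 1).foldl
    (fun answer i =>
      if i == 1 then answer ++ [(0 : Int)]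
      else
        match aScan i (PySem.List.pyRange 2 (sqrtInt i + 1) 1) with
        | some q => answer ++ [q]
        | none => answer ++ [(1 : Int)]) []

-- ===== PORT B =====
-- one marking step of the sieve: `if best[m-begin] is None and m//j <= 10000000: best[m-begin] = m//j`
-- (the index m - begin is provably inside [0, len best) whenever the loop reaches it)
def bMark (begin j : Int) (best : List (Option Int)) (m : Int) : List (Option Int) :=
  if PySem.List.pyGetD best (m - begin) none = none ∧ PySem.Int.floordiv m j ≤ 10000000 then
    PySem.List.pySetD best (m - begin) (some (PySem.Int.floordiv m j))
  else best

-- `for m in range(start, end+1, j)` with start = max(j*j, -(-begin//j)*j)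
def bOuter (begin end_ : Int) (best : List (Option Int)) (j : Int) : List (Option Int) :=
  (PySem.List.pyRange (max (j * j) (-(PySem.Int.floordiv (-begin) j) * j)) (end_ + 1) j).foldl
    (bMark begin j) best

def solution_alt (begin : Int) (end_ : Int) : List Int :=
  if end_ < begin then []
  else
    let best :=
      (PySem.List.pyRange 2 (sqrtInt end_ + 1) 1).foldl (bOuter begin end_)
        (List.replicate (end_ - begin + 1).toNat none)
    (PySem.List.pyRange begin (end_ + 1) 1).map (fun i =>
      if i == 1 then (0 : Int)
      else
        match PySem.List.pyGetD best (i - begin) none with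
        | none => (1 : Int)
        | some q => q)

-- ===== PRECONDITION & SPEC =====
-- A raises ValueError (math.sqrt of a negative number) as soon as the range contains a negative i,
-- i.e. whenever begin < 0 and begin ≤ end; exactly those inputs are excluded.
def Pre_solution (begin : Int) (end_ : Int) : Prop := end_ < begin ∨ 0 ≤ begin
instance (begin : Int) (end_ : Int) : Decidable (Pre_solution begin end_) := by
  unfold Pre_solution; infer_instance

def pvWitness_solution : Int × Int := (2, 20)

def Spec_solution (begin : Int) (end_ : Int) (out : List Int) : Prop := out = solution_alt begin end_
instance (begin : Int) (end_ : Int) (out : List Int) : Decidable (Spec_solution begin end_ out) := by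
  unfold Spec_solution; infer_instance

-- ===== CLAIM (what is proved, stated in full; the proofs are below) =====
def Claim_equal_solution : Prop := ∀ (begin : Int) (end_ : Int), Dom_solution begin end_ →
  Pre_solution begin end_ → Spec_solution begin end_ (solution begin end_)


-- ===== LEMMAS AND PROOFS =====

-- A's inner-loop predicate: j is counted iff i//j stays under the cap and j divides i
def pA (i j : Int) : Bool :=
  decide (PySem.Int.floordiv i j ≤ 10000000) && (PySem.Int.mod i j == 0)

-- B's per-j condition for number i: i is in j's multiples list and i//j stays under the cap
def pB (begin end_ i j : Int) : Bool :=
  decide (i ∈ PySem.List.pyRange (max (j * j) (-(PySem.Int.floordiv (-begin) j) * j)) (end_ + 1) j ∧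
    PySem.Int.floordiv i j ≤ 10000000)

lemma aScan_eq_find? (i : Int) (l : List Int) :
    aScan i l = (l.find? (pA i)).map (fun j => PySem.Int.floordiv i j) := by
  induction l with
  | nil => rfl
  | cons j rest ih =>
    simp only [aScan, List.find?_cons, pA]
    by_cases hcap : PySem.Int.floordiv i j > 10000000
    · have h1 : decide (PySem.Int.floordiv i j ≤ 10000000) = false := by
        simp only [decide_eq_false_iff_not]; omega
      simp [hcap, h1, ih]
    · have h1 : decide (PySem.Int.floordiv i j ≤ 10000000) = true := by
        simp only [decide_eq_true_eq]; omega
      by_cases hm : PySem.Int.mod i j = 0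
      · have hbeq : (PySem.Int.mod i j == 0) = true := by simp [hm]
        simp [hcap, h1, hbeq]
      · have hbeq : (PySem.Int.mod i j == 0) = false := by simp [hm]
        simp [hcap, h1, hbeq, ih]

lemma bMark_length (begin j : Int) (best : List (Option Int)) (m : Int) :
    (bMark begin j best m).length = best.length := by
  unfold bMark
  split
  · exact PySem.List.length_pySetD _ _ _
  · rfl

lemma inner_length (begin j : Int) (M : List Int) (best : List (Option Int)) :
    (M.foldl (bMark begin j) best).length = best.length := by
  induction M generalizing best with
  | nil => rfl
  | cons m M ih => rw [List.foldl_cons, ih, bMark_length]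

lemma inner_getD (begin j : Int) (M : List Int) (hnd : M.Nodup) (hM : ∀ m ∈ M, begin ≤ m)
    (best : List (Option Int)) (idx : Nat) (hidx : idx < best.length) :
    (M.foldl (bMark begin j) best).getD idx none =
      if (begin + idx) ∈ M ∧ best.getD idx none = none ∧
          PySem.Int.floordiv (begin + idx) j ≤ 10000000
      then some (PySem.Int.floordiv (begin + idx) j)
      else best.getD idx none := by
  induction M generalizing best with
  | nil => simp
  | cons m M ih =>
    have hbm : begin ≤ m := hM m (by simp)
    have hnd' : M.Nodup := hnd.of_cons
    have hM' : ∀ x ∈ M, begin ≤ x := fun x hx => hM x (List.mem_cons_of_mem _ hx)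
    have hmnotin : m ∉ M := (List.nodup_cons.mp hnd).1
    rw [List.foldl_cons]
    by_cases hm : m = begin + (idx : Int)
    · -- this step targets exactly index idx
      have hidxeq : (m - begin).toNat = idx := by omega
      by_cases hg : best.getD idx none = none ∧ PySem.Int.floordiv m j ≤ 10000000
      · have hstep : bMark begin j best m = best.set idx (some (PySem.Int.floordiv m j)) := by
          unfold bMark
          rw [PySem.List.pyGetD_of_nonneg _ _ (by omega : (0:Int) ≤ m - begin),
            PySem.List.pySetD_of_nonneg _ _ (by omega : (0:Int) ≤ m - begin), hidxeq]
          exact if_pos hg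
        rw [hstep, ih hnd' hM' _ (by rw [List.length_set]; exact hidx)]
        have hgd : (best.set idx (some (PySem.Int.floordiv m j))).getD idx none =
            some (PySem.Int.floordiv m j) := by
          simp [List.getD_eq_getElem?_getD, hidx]
        have hnotmem : begin + (idx : Int) ∉ M := hm ▸ hmnotin
        rw [if_neg (by rw [hgd]; rintro ⟨h1, h2, -⟩; exact hnotmem h1), hgd,
          if_pos ⟨by rw [hm]; exact List.mem_cons_self, hg.1, by rw [← hm]; exact hg.2⟩, ← hm]
      · have hstep : bMark begin j best m = best := by
          unfold bMark
          rw [PySem.List.pyGetD_of_nonneg _ _ (by omega : (0:Int) ≤ m - begin), hidxeq]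
          exact if_neg hg
        rw [hstep, ih hnd' hM' _ hidx]
        have hnotmem : begin + (idx : Int) ∉ M := hm ▸ hmnotin
        rw [if_neg (by rintro ⟨h1, -, -⟩; exact hnotmem h1),
          if_neg (by rintro ⟨-, h2, h3⟩; exact hg ⟨h2, by rw [hm]; exact h3⟩)]
    · -- this step targets a different index
      have hne : (m - begin).toNat ≠ idx := by omega
      have hstep : (bMark begin j best m).getD idx none = best.getD idx none := by
        unfold bMark
        split
        · rw [PySem.List.pySetD_of_nonneg _ _ (by omega : (0:Int) ≤ m - begin)]
          simp [List.getD_eq_getElem?_getD, List.getElem?_set_ne hne]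
        · rfl
      rw [ih hnd' hM' _ (by rw [bMark_length]; exact hidx), hstep]
      have hmm : (begin + (idx : Int) ∈ m :: M) ↔ (begin + (idx : Int) ∈ M) := by
        simp only [List.mem_cons, or_iff_right_iff_imp]
        intro h; exact absurd h.symm hm
      rw [if_congr (and_congr_left' hmm) rfl rfl]

lemma ceil_mul_ge (begin j : Int) (hj : 0 < j) :
    begin ≤ -(PySem.Int.floordiv (-begin) j) * j := by
  have h := PySem.Int.floordiv_mul_add_mod (-begin) j
  have h2 := PySem.Int.mod_nonneg (-begin) hj
  rw [neg_mul]
  linarith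

lemma nodup_pyRange_pos (a b : Int) {s : Int} (hs : 0 < s) :
    (PySem.List.pyRange a b s).Nodup := by
  rw [PySem.List.pyRange_of_pos a b hs]
  refine List.Nodup.map ?_ List.nodup_range
  intro x y hxy
  have : s * (x : Int) = s * (y : Int) := by linarith
  have := mul_left_cancel₀ (ne_of_gt hs) this
  exact_mod_cast this

lemma outer_getD (begin end_ : Int) (J : List Int) (hJ : ∀ j ∈ J, 0 < j)
    (best : List (Option Int)) (idx : Nat) (hidx : idx < best.length) :
    (J.foldl (bOuter begin end_) best).getD idx none =
      (best.getD idx none).or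
        ((J.find? (pB begin end_ (begin + idx))).map
          (fun j => PySem.Int.floordiv (begin + idx) j)) := by
  induction J generalizing best with
  | nil => simp
  | cons j J ih =>
    have hj : 0 < j := hJ j (by simp)
    have hJ' : ∀ x ∈ J, 0 < x := fun x hx => hJ x (List.mem_cons_of_mem _ hx)
    rw [List.foldl_cons]
    have hM : ∀ m ∈ PySem.List.pyRange
        (max (j * j) (-(PySem.Int.floordiv (-begin) j) * j)) (end_ + 1) j, begin ≤ m := by
      intro m hm
      rw [PySem.List.mem_pyRange_iff_of_pos hj] at hm
      have h1 := ceil_mul_ge begin j hj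
      have h2 := le_max_right (j * j) (-(PySem.Int.floordiv (-begin) j) * j)
      linarith [hm.1]
    have hstep : bOuter begin end_ best j =
        (PySem.List.pyRange (max (j * j) (-(PySem.Int.floordiv (-begin) j) * j)) (end_ + 1) j).foldl
          (bMark begin j) best := rfl
    rw [hstep, ih hJ' _ (by rw [inner_length]; exact hidx),
      inner_getD begin j _ (nodup_pyRange_pos _ _ hj) hM best idx hidx, List.find?_cons]
    cases hgd : best.getD idx none with
    | some v =>
      rw [if_neg (by rintro ⟨-, h, -⟩; simp at h)]
      simp
    | none =>
      by_cases hc : (begin + (idx : Int)) ∈ PySem.List.pyRange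
          (max (j * j) (-(PySem.Int.floordiv (-begin) j) * j)) (end_ + 1) j ∧
          PySem.Int.floordiv (begin + (idx : Int)) j ≤ 10000000
      · have hpB : pB begin end_ (begin + (idx : Int)) j = true := by
          simp only [pB, decide_eq_true_eq]; exact hc
        rw [if_pos ⟨hc.1, rfl, hc.2⟩, hpB]
        simp
      · have hpB : pB begin end_ (begin + (idx : Int)) j = false := by
          simp only [pB, decide_eq_false_iff_not]; exact hc
        rw [if_neg (by rintro ⟨h1, -, h3⟩; exact hc ⟨h1, h3⟩), hpB]

-- membership in j's multiples list, arithmetically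
lemma mem_multiples_iff (begin end_ i j : Int) (hj : 0 < j) (hbi : begin ≤ i) (hie : i ≤ end_) :
    (i ∈ PySem.List.pyRange (max (j * j) (-(PySem.Int.floordiv (-begin) j) * j)) (end_ + 1) j) ↔
      (j ∣ i ∧ j * j ≤ i) := by
  rw [PySem.List.mem_pyRange_iff_of_pos hj]
  have hc1 : begin ≤ -(PySem.Int.floordiv (-begin) j) * j := ceil_mul_ge begin j hj
  have hc2 : -(PySem.Int.floordiv (-begin) j) * j < begin + j := by
    have h := PySem.Int.floordiv_mul_add_mod (-begin) j
    have h2 := PySem.Int.mod_lt (-begin) hj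
    rw [neg_mul]; linarith
  have hdvd_start : j ∣ max (j * j) (-(PySem.Int.floordiv (-begin) j) * j) := by
    rcases max_choice (j * j) (-(PySem.Int.floordiv (-begin) j) * j) with h | h <;> rw [h]
    · exact dvd_mul_right j j
    · exact dvd_mul_left j _
  constructor
  · rintro ⟨h1, h2, h3⟩
    refine ⟨?_, le_trans (le_max_left _ _) h1⟩
    have := dvd_add h3 hdvd_start
    simpa using this
  · rintro ⟨hdvd, hsq⟩
    have hcj : -(PySem.Int.floordiv (-begin) j) * j ≤ i := by
      by_contra hlt
      rw [not_le] at hlt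
      have hpos : 0 < -(PySem.Int.floordiv (-begin) j) * j - i := by omega
      have hd : j ∣ -(PySem.Int.floordiv (-begin) j) * j - i :=
        dvd_sub (dvd_mul_left j _) hdvd
      have := Int.le_of_dvd hpos hd
      omega
    exact ⟨max_le hsq hcj, by omega, dvd_sub hdvd hdvd_start⟩

lemma sq_le_iff_le_sqrt (i j : Int) (hi : 0 ≤ i) (hj : 0 ≤ j) :
    j * j ≤ i ↔ j ≤ sqrtInt i := by
  lift i to ℕ using hi
  lift j to ℕ using hj
  unfold sqrtInt
  rw [Int.toNat_natCast]
  constructor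
  · intro h
    exact_mod_cast Nat.le_sqrt.mpr (by exact_mod_cast h)
  · intro h
    exact_mod_cast Nat.le_sqrt.mp (by exact_mod_cast h)

lemma find?_congr_mem {α : Type} (l : List α) (p q : α → Bool) (h : ∀ x ∈ l, p x = q x) :
    l.find? p = l.find? q := by
  induction l with
  | nil => rfl
  | cons a t ih =>
    simp only [List.find?_cons]
    rw [h a (by simp)]
    cases hq : q a with
    | true => rfl
    | false => exact ih (fun x hx => h x (by simp [hx]))

-- the two minimal-divisor searches agree
lemma find?_eq (begin end_ i : Int) (hb : 0 ≤ begin) (hbi : begin ≤ i) (hie : i ≤ end_) :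
    (PySem.List.pyRange 2 (sqrtInt i + 1) 1).find? (pA i) =
      (PySem.List.pyRange 2 (sqrtInt end_ + 1) 1).find? (pB begin end_ i) := by
  have h0i : 0 ≤ i := le_trans hb hbi
  have h0e : 0 ≤ end_ := le_trans h0i hie
  have hSi0 : 0 ≤ sqrtInt i := by unfold sqrtInt; positivity
  have hSie : sqrtInt i ≤ sqrtInt end_ := by
    unfold sqrtInt
    exact_mod_cast Nat.sqrt_le_sqrt (by omega)
  by_cases hse : 2 ≤ sqrtInt end_ + 1
  case neg =>
    rw [PySem.List.pyRange_one_eq_nil (by omega : sqrtInt i + 1 ≤ 2),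
      PySem.List.pyRange_one_eq_nil (by omega : sqrtInt end_ + 1 ≤ 2)]
    rfl
  case pos =>
    have hm2 : (2 : Int) ≤ max 2 (sqrtInt i + 1) := le_max_left _ _
    have hmle : max 2 (sqrtInt i + 1) ≤ sqrtInt end_ + 1 := by omega
    rw [PySem.List.pyRange_one_append 2 (max 2 (sqrtInt i + 1)) (sqrtInt end_ + 1) hm2 hmle,
      List.find?_append]
    have hhead : PySem.List.pyRange 2 (sqrtInt i + 1) 1 =
        PySem.List.pyRange 2 (max 2 (sqrtInt i + 1)) 1 := by
      by_cases h2 : 2 ≤ sqrtInt i + 1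
      · rw [max_eq_right h2]
      · rw [PySem.List.pyRange_one_eq_nil (by omega), PySem.List.pyRange_one_eq_nil (by omega)]
    have htail : (PySem.List.pyRange (max 2 (sqrtInt i + 1)) (sqrtInt end_ + 1) 1).find?
        (pB begin end_ i) = none := by
      rw [List.find?_eq_none]
      intro x hx
      rw [PySem.List.mem_pyRange_one] at hx
      simp only [pB, decide_eq_true_eq, not_and]
      intro hmem
      rw [mem_multiples_iff begin end_ i x (by omega) hbi hie] at hmem
      have : x ≤ sqrtInt i := (sq_le_iff_le_sqrt i x h0i (by omega)).mp hmem.2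
      omega
    rw [htail, ← hhead]
    have hcongr : (PySem.List.pyRange 2 (sqrtInt i + 1) 1).find? (pA i) =
        (PySem.List.pyRange 2 (sqrtInt i + 1) 1).find? (pB begin end_ i) := by
      apply find?_congr_mem
      intro x hx
      rw [PySem.List.mem_pyRange_one] at hx
      have hxpos : (0 : Int) < x := by omega
      have hsq : x * x ≤ i := (sq_le_iff_le_sqrt i x h0i (by omega)).mpr (by omega)
      rw [Bool.eq_iff_iff]
      simp only [pA, pB, Bool.and_eq_true, decide_eq_true_eq, beq_iff_eq,
        PySem.Int.mod_eq_zero_iff_dvd, mem_multiples_iff begin end_ i x hxpos hbi hie]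
      constructor
      · rintro ⟨h1, h2⟩; exact ⟨⟨h2, hsq⟩, h1⟩
      · rintro ⟨⟨h1, -⟩, h2⟩; exact ⟨h2, h1⟩
    rw [hcongr]
    cases hf : (PySem.List.pyRange 2 (sqrtInt i + 1) 1).find? (pB begin end_ i) <;> rfl

-- the value A appends for number i
def fA (i : Int) : Int :=
  if i == 1 then 0
  else
    match aScan i (PySem.List.pyRange 2 (sqrtInt i + 1) 1) with
    | some q => q
    | none => 1

lemma value_eq (begin end_ i : Int) (hb : 0 ≤ begin) (hbi : begin ≤ i) (hie : i ≤ end_) :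
    fA i =
      (if i == 1 then (0 : Int)
       else
         match PySem.List.pyGetD
             ((PySem.List.pyRange 2 (sqrtInt end_ + 1) 1).foldl (bOuter begin end_)
               (List.replicate (end_ - begin + 1).toNat none)) (i - begin) none with
         | none => (1 : Int)
         | some q => q) := by
  unfold fA
  cases h1 : (i == 1) with
  | true => simp
  | false =>
    simp only [Bool.false_eq_true, if_false]
    rw [aScan_eq_find?, find?_eq begin end_ i hb hbi hie,
      PySem.List.pyGetD_of_nonneg _ _ (by omega : (0:Int) ≤ i - begin)]
    have hidxlt : (i - begin).toNat <
        (List.replicate (end_ - begin + 1).toNat (none : Option Int)).length := by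
      rw [List.length_replicate]; omega
    rw [outer_getD begin end_ _
      (fun j hj => by rw [PySem.List.mem_pyRange_one] at hj; omega) _ _ hidxlt]
    have hi2 : begin + (((i - begin).toNat : Nat) : Int) = i := by omega
    rw [hi2,
      show (List.replicate (end_ - begin + 1).toNat (none : Option Int)).getD
          (i - begin).toNat none = none from by simp [List.getD_eq_getElem?_getD],
      Option.none_or]
    cases hf : (PySem.List.pyRange 2 (sqrtInt end_ + 1) 1).find? (pB begin end_ i) <;> simp

-- ===== VERDICT (by name: the statement is the Claim_ definition above) =====
theorem solution_spec : Claim_equal_solution := by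
  intro begin end_ _ hpre
  unfold Spec_solution solution solution_alt
  by_cases hend : end_ < begin
  · rw [if_pos hend, PySem.List.pyRange_one_eq_nil (by omega : end_ + 1 ≤ begin)]
    rfl
  · have hb : 0 ≤ begin := hpre.resolve_left hend
    have hbody : (fun (answer : List Int) (i : Int) =>
        if i == 1 then answer ++ [(0 : Int)]
        else
          match aScan i (PySem.List.pyRange 2 (sqrtInt i + 1) 1) with
          | some q => answer ++ [q]
          | none => answer ++ [(1 : Int)]) =
        fun answer i => answer ++ [fA i] := by
      funext a i
      unfold fA
      cases h1 : (i == 1) with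
      | true => simp
      | false =>
        cases haS : aScan i (PySem.List.pyRange 2 (sqrtInt i + 1) 1) <;> simp
    rw [if_neg hend, hbody, PySem.List.foldl_append_singleton_eq_map, List.nil_append]
    have hmap : (PySem.List.pyRange begin (end_ + 1) 1).map fA =
        (PySem.List.pyRange begin (end_ + 1) 1).map (fun i =>
          if i == 1 then (0 : Int)
          else
            match PySem.List.pyGetD
                ((PySem.List.pyRange 2 (sqrtInt end_ + 1) 1).foldl (bOuter begin end_)
                  (List.replicate (end_ - begin + 1).toNat none)) (i - begin) none with
            | none => (1 : Int)
            | some q => q) := by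
      apply List.map_congr_left
      intro i hi
      rw [PySem.List.mem_pyRange_one] at hi
      exact value_eq begin end_ i hb hi.1 (by omega)
    exact hmap
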